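-- pv_equiv track=rewrite | github.com/runxiyu/idc-old | implementation/misc.py | parse
-- ===== SOURCE A (Python) =====
-- def parse(msg):
--     n = msg.split(" ")
--
--     if n[0].startswith(":"):
--         while len(n) < 2:
--             n.append("")
--         hostmask = n[0][1:].split("!", 1)
--         if len(hostmask) < 2:
--             hostmask.append("")
--         i = hostmask[1].split("@", 1)
--         if len(i) < 2:
--             i.append("")
--         hostmask = (hostmask[0], i[0], i[1])
--         cmd = n[1]
--     else:
--         cmd = n[0]
--         hostmask = ("","","")
--         n.insert(0, "")
--
--     args = []
--     c = 1
--     for i in n[2:]: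
--         c += 1
--         if i.startswith(":"):
--             args.append((" ".join(n[c:]))[1:])
--             break
--         else:
--             args.append(i)
--
--     return cmd, hostmask, args
-- ===== SOURCE B (Python) =====
-- def parse(msg):
--     L = len(msg)
--
--     def token(i):
--         j = i
--         while j < L and msg[j] != " ":
--             j += 1
--         return msg[i:j], j
--
--     if msg.startswith(":"):
--         pre, i = token(1)
--         part, name, user, host = 0, "", "", ""
--         for ch in pre:
--             if part == 0 and ch == "!":
--                 part = 1
--             elif part == 1 and ch == "@":
--                 part = 2
--             elif part == 0:
--                 name += ch
--             elif part == 1: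
--                 user += ch
--             else:
--                 host += ch
--         hostmask = (name, user, host)
--         if i < L:
--             cmd, i = token(i + 1)
--         else:
--             cmd = ""
--     else:
--         hostmask = ("", "", "")
--         cmd, i = token(0)
--
--     args = []
--     while i < L:
--         i += 1
--         if i < L and msg[i] == ":":
--             args.append(msg[i + 1:])
--             break
--         t, i = token(i)
--         args.append(t)
--
--     return cmd, hostmask, args
-- ===== Notes on version B (the rewrite author's own statement) =====
-- stated objective: alternative
-- what changed: B never tokenizes: instead of A's split-on-space into a token list (with padding, list insertion, split-with-maxsplit hostmask parsing and a join of the token tail for the trailing argument), B is a single character-level scanner over the raw string - an index-based token() cursor, a three-state character machine for name/user/host, and a while loop that takes the remainder substring directly when a colon character follows a space.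
import Mathlib
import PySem

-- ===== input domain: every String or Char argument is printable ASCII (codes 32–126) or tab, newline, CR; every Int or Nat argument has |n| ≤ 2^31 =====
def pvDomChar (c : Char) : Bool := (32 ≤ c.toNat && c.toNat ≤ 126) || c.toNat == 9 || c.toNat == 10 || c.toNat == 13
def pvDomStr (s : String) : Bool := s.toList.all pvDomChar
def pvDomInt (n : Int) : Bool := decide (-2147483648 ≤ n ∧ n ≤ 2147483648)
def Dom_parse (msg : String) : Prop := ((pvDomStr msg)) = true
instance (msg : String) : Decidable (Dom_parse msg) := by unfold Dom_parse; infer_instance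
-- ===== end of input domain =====

-- B never builds a token list: it is a single character-level scanner (index cursor, a
-- three-state hostmask machine, remainder-substring trailing argument) instead of A's
-- split/pad/insert/join token-list pipeline (objective: alternative; same cost).

-- ===== PORT A =====

-- while len(n) < 2: n.append("")
def parsePad2 (n : List String) : List String :=
  if n.length < 2 then parsePad2 (n ++ [""]) else n
termination_by 2 - n.length
decreasing_by simp; omega

-- the "for i in n[2:]" accumulate/break loop (c is the running index, args the accumulator)
def parseLoopA (n : List String) (rest : List String) (c : Int) (args : List String) : List String :=
  match rest with
  | [] => args
  | i :: tl =>
    let c' := c + 1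
    if PySem.Str.startswith i ":" then
      args ++ [PySem.Str.slice (PySem.Str.join " " (PySem.List.slice n (some c') none)) (some 1) none]
    else
      parseLoopA n tl c' (args ++ [i])

def parse (msg : String) : String × (String × String × String) × List String :=
  let n := (PySem.Str.split? msg " ").getD []
  if PySem.Str.startswith ((PySem.List.pyGet? n 0).getD "") ":" then
    let n := parsePad2 n
    let hostmask := (PySem.Str.splitMax? (PySem.Str.slice ((PySem.List.pyGet? n 0).getD "") (some 1) none) "!" 1).getD []
    let hostmask := if hostmask.length < 2 then hostmask ++ [""] else hostmask
    let i := (PySem.Str.splitMax? ((PySem.List.pyGet? hostmask 1).getD "") "@" 1).getD []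
    let i := if i.length < 2 then i ++ [""] else i
    let hm : String × String × String :=
      ((PySem.List.pyGet? hostmask 0).getD "", (PySem.List.pyGet? i 0).getD "", (PySem.List.pyGet? i 1).getD "")
    let cmd := (PySem.List.pyGet? n 1).getD ""
    (cmd, hm, parseLoopA n (PySem.List.slice n (some 2) none) 1 [])
  else
    let cmd := (PySem.List.pyGet? n 0).getD ""
    let n := PySem.List.insert n 0 ""
    (cmd, ("", "", ""), parseLoopA n (PySem.List.slice n (some 2) none) 1 [])

-- ===== PORT B =====

-- the inner token(i) cursor: chars of the token, and the rest (starting at the space, if any)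
def tokenB : List Char → List Char × List Char
  | [] => ([], [])
  | c :: tl =>
    if c = ' ' then ([], c :: tl)
    else
      let p := tokenB tl
      (c :: p.1, p.2)

-- needed by argsB's termination (the port cites it by name)
theorem tokenB_snd_length : ∀ l : List Char, (tokenB l).2.length ≤ l.length := by
  intro l
  induction l with
  | nil => simp [tokenB]
  | cons c tl ih =>
    by_cases hc : c = ' ' <;> simp [tokenB, hc] <;> omega

-- one step of B's hostmask for-loop: state = (part, name, user, host)
def hmStep (st : Nat × List Char × List Char × List Char) (ch : Char) :
    Nat × List Char × List Char × List Char :=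
  if st.1 = 0 ∧ ch = '!' then (1, st.2.1, st.2.2.1, st.2.2.2)
  else if st.1 = 1 ∧ ch = '@' then (2, st.2.1, st.2.2.1, st.2.2.2)
  else if st.1 = 0 then (st.1, st.2.1 ++ [ch], st.2.2.1, st.2.2.2)
  else if st.1 = 1 then (st.1, st.2.1, st.2.2.1 ++ [ch], st.2.2.2)
  else (st.1, st.2.1, st.2.2.1, st.2.2.2 ++ [ch])

-- B's "while i < L" args loop; the argument starts at the space (index i), or is []
def argsB : List Char → List (List Char)
  | [] => []
  | _ :: tl =>
    if tl.head? == some ':' then [tl.tail]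
    else
      let p := tokenB tl
      p.1 :: argsB p.2
termination_by l => l.length
decreasing_by
  simp only [List.length_cons]
  exact Nat.lt_succ_of_le (tokenB_snd_length tl)

def parse_alt (msg : String) : String × (String × String × String) × List String :=
  let s := msg.toList
  if s.head? == some ':' then
    let p := tokenB s.tail
    let hm := p.1.foldl hmStep (0, [], [], [])
    let hostmask := (String.ofList hm.2.1, String.ofList hm.2.2.1, String.ofList hm.2.2.2)
    match p.2 with
    | [] => ("", hostmask, [])
    | _ :: tl2 =>
      let q := tokenB tl2
      (String.ofList q.1, hostmask, (argsB q.2).map String.ofList)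
  else
    let q := tokenB s
    (String.ofList q.1, ("", "", ""), (argsB q.2).map String.ofList)

-- ===== PRECONDITION & SPEC =====
def Spec_parse (msg : String) (out : String × (String × String × String) × List String) : Prop := out = parse_alt msg
instance (msg : String) (out : String × (String × String × String) × List String) : Decidable (Spec_parse msg out) := by unfold Spec_parse; infer_instance

-- ===== CLAIM (what is proved, stated in full; the proofs are below) =====
def Claim_equal_parse : Prop := ∀ (msg : String), Dom_parse msg → Spec_parse msg (parse msg)

-- ===== LEMMAS AND PROOFS =====

-- the token list msg.split(" ") produces, described through B's cursor
def tokens (s : List Char) : List (List Char) :=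
  match h : (tokenB s).2 with
  | [] => [(tokenB s).1]
  | _ :: r => (tokenB s).1 :: tokens r
termination_by s.length
decreasing_by
  have h1 := tokenB_snd_length s
  rw [h] at h1
  simp at h1
  omega

def tokensAfter : List Char → List (List Char)
  | [] => []
  | _ :: r => tokens r

theorem tokenB_space (tl : List Char) : tokenB (' ' :: tl) = ([], ' ' :: tl) := by
  simp [tokenB]

theorem tokenB_char (c : Char) (tl : List Char) (hc : c ≠ ' ') :
    tokenB (c :: tl) = (c :: (tokenB tl).1, (tokenB tl).2) := by
  simp [tokenB, hc]

theorem tokenB_append (l : List Char) : (tokenB l).1 ++ (tokenB l).2 = l := by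
  induction l with
  | nil => simp [tokenB]
  | cons c tl ih =>
    by_cases hc : c = ' '
    · subst hc; simp [tokenB_space]
    · simp [tokenB_char c tl hc, ih]

theorem tokenB_snd_shape (l : List Char) :
    (tokenB l).2 = [] ∨ (tokenB l).2.head? = some ' ' := by
  induction l with
  | nil => simp [tokenB]
  | cons c tl ih =>
    by_cases hc : c = ' '
    · subst hc; right; simp [tokenB_space]
    · simpa [tokenB_char c tl hc] using ih

theorem tokens_eq (s : List Char) : tokens s = (tokenB s).1 :: tokensAfter (tokenB s).2 := by
  rw [tokens]
  cases h : (tokenB s).2 with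
  | nil => simp [tokensAfter]
  | cons x r => simp [tokensAfter]

-- msg.split(" ") computed by the go-loop equals the tokens of B's cursor
theorem go_tokens : ∀ (fuel : Nat) (s cur : List Char) (acc : List (List Char)),
    s.length < fuel →
    PySem.Chars.splitOn.go [' '] fuel s cur acc
      = acc.reverse ++ (cur.reverse ++ (tokenB s).1) :: tokensAfter (tokenB s).2 := by
  intro fuel
  induction fuel with
  | zero => intro s cur acc h; omega
  | succ f ih =>
    intro s cur acc h
    cases s with
    | nil =>
      simp [PySem.Chars.splitOn.go, tokenB, tokensAfter]
    | cons c rest =>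
      rw [PySem.Chars.splitOn.go]
      by_cases hc : c = ' '
      · subst hc
        have hpre : [' '].isPrefixOf (' ' :: rest) = true := by simp [List.isPrefixOf]
        simp only [hpre, if_true]
        have hd : List.drop [' '].length (' ' :: rest) = rest := by simp
        rw [hd, ih rest [] (cur.reverse :: acc) (by simpa using Nat.lt_of_succ_lt_succ h)]
        rw [tokenB_space]
        simp [tokensAfter, tokens_eq rest]
      · have hpre : [' '].isPrefixOf (c :: rest) = false := by
          simp [List.isPrefixOf]; exact fun hh => hc hh.symm
        simp only [hpre, Bool.false_eq_true, if_false]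
        rw [ih rest (c :: cur) acc (by simpa using Nat.lt_of_succ_lt_succ h)]
        rw [tokenB_char c rest hc]
        simp

theorem split_eq_tokens (msg : String) :
    (PySem.Str.split? msg " ").getD [] = (tokens msg.toList).map String.ofList := by
  have h : (" " : String).toList = [' '] := by decide
  simp only [PySem.Str.split?, PySem.Chars.split?, h, List.isEmpty_cons, Bool.false_eq_true,
    if_false, Option.map_some, Option.getD_some]
  rw [PySem.Chars.splitOn, go_tokens (msg.toList.length + 1) msg.toList [] [] (by omega)]
  rw [tokens_eq]
  simp

-- joining the tokens back with " " restores the character list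
theorem join_tokens : ∀ s : List Char, PySem.Chars.join [' '] (tokens s) = s := by
  intro s
  induction hn : s.length using Nat.strong_induction_on generalizing s with
  | _ n ih =>
    subst hn
    rw [tokens_eq]
    rcases tokenB_snd_shape s with h2 | h2
    · rw [h2]
      simpa [tokensAfter, PySem.Chars.join_singleton, h2] using tokenB_append s
    · cases hr : (tokenB s).2 with
      | nil => rw [hr] at h2; simp at h2
      | cons sp r =>
        rw [hr] at h2; simp at h2; subst h2
        have hlen : r.length < s.length := by
          have := tokenB_snd_length s
          rw [hr] at this; simp at this; omega
        simp only [tokensAfter]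
        rw [tokens_eq r, PySem.Chars.join_cons_cons, ← tokens_eq r, ih r.length hlen r rfl]
        have := tokenB_append s
        rw [hr] at this
        simpa using this

-- B's startswith-":" test on the first token, in terms of the raw head character
theorem startswith_token (s : List Char) :
    PySem.Chars.startswith (tokenB s).1 [':'] = decide (s.head? = some ':') := by
  cases s with
  | nil => simp [tokenB, PySem.Chars.startswith, List.isPrefixOf]
  | cons c tl =>
    by_cases hc : c = ' '
    · subst hc
      simp [tokenB_space, PySem.Chars.startswith, List.isPrefixOf]
    · rw [tokenB_char c tl hc]
      simp only [PySem.Chars.startswith, List.isPrefixOf, List.head?_cons]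
      by_cases h : c = ':'
      · subst h; simp
      · simp [h]; exact fun hh => absurd hh.symm h

-- ---- hostmask: A's split-with-maxsplit pipeline vs B's three-state character machine ----

-- first occurrence of a separator character (proof-side description of the split point)
def partChars (sep : Char) : List Char → Option (List Char × List Char)
  | [] => none
  | c :: rest =>
    if c = sep then some ([], rest)
    else (partChars sep rest).map (fun p => (c :: p.1, p.2))

-- the m = 0 tail of splitOnMax.go just returns the rest as the final piece
theorem splitOnMax_go_zero (sep : List Char) (fuel : Nat) (l cur : List Char) (acc : List (List Char)) :
    PySem.Chars.splitOnMax.go sep fuel 0 l cur acc = acc.reverse ++ [cur.reverse ++ l] := by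
  cases fuel with
  | zero => simp [PySem.Chars.splitOnMax.go]
  | succ f =>
    cases l with
    | nil => simp [PySem.Chars.splitOnMax.go]
    | cons c rest => rw [PySem.Chars.splitOnMax.go]; simp

-- s.split(ch, 1) in terms of the first occurrence of ch
theorem splitOnMax_go_one (ch : Char) : ∀ (l : List Char) (fuel : Nat) (cur : List Char)
    (acc : List (List Char)), l.length < fuel →
    PySem.Chars.splitOnMax.go [ch] fuel 1 l cur acc =
      acc.reverse ++ (match partChars ch l with
        | none => [cur.reverse ++ l]
        | some (a, b) => [cur.reverse ++ a, b]) := by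
  intro l
  induction l with
  | nil =>
    intro fuel cur acc hf
    match fuel, hf with
    | f + 1, _ => simp [PySem.Chars.splitOnMax.go, partChars]
  | cons c rest ih =>
    intro fuel cur acc hf
    match fuel, hf with
    | f + 1, hf =>
      rw [PySem.Chars.splitOnMax.go]
      simp only [partChars]
      by_cases hc : c = ch
      · subst hc
        have hpre : [c].isPrefixOf (c :: rest) = true := by simp [List.isPrefixOf]
        simp only [hpre, if_true, if_neg (by decide : ¬(1 : Nat) = 0)]
        rw [splitOnMax_go_zero]
        simp
      · have hpre : [ch].isPrefixOf (c :: rest) = false := by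
          simp [List.isPrefixOf]; exact fun h => hc h.symm
        simp only [hpre, if_neg (by decide : ¬(1 : Nat) = 0), Bool.false_eq_true, if_false]
        rw [ih f (c :: cur) acc (by simpa using Nat.lt_of_succ_lt_succ hf)]
        simp only [if_neg hc]
        cases hp : partChars ch rest with
        | none => simp
        | some p => cases p with | mk a b => simp

theorem splitOnMax_one (ch : Char) (l : List Char) :
    PySem.Chars.splitOnMax l [ch] 1 = (match partChars ch l with
      | none => [l]
      | some (a, b) => [a, b]) := by
  rw [PySem.Chars.splitOnMax]
  simp only [show ¬((1:Int) < 0) by decide, if_false, Int.toNat_one]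
  rw [splitOnMax_go_one ch l (l.length + 1) [] [] (by omega)]
  cases hp : partChars ch l with
  | none => simp
  | some p => cases p with | mk a b => simp

-- B's fold in state 2 only appends to host
theorem hmFold2 : ∀ (l nm us ho : List Char),
    List.foldl hmStep (2, nm, us, ho) l = (2, nm, us, ho ++ l) := by
  intro l
  induction l with
  | nil => simp
  | cons c tl ih => intro nm us ho; simp [hmStep, ih]

-- B's fold in state 1: split at the first '@'
theorem hmFold1 : ∀ (l nm us : List Char),
    List.foldl hmStep (1, nm, us, []) l =
      (match partChars '@' l with
        | none => (1, nm, us ++ l, [])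
        | some (u, v) => (2, nm, us ++ u, v)) := by
  intro l
  induction l with
  | nil => simp [partChars]
  | cons c tl ih =>
    intro nm us
    simp only [partChars]
    by_cases hc : c = '@'
    · subst hc
      rw [List.foldl_cons]
      have hstep : hmStep (1, nm, us, []) '@' = (2, nm, us, []) := by simp [hmStep]
      rw [hstep, hmFold2]
      simp
    · have : hmStep (1, nm, us, []) c = (1, nm, us ++ [c], []) := by
        simp [hmStep, hc]
      rw [List.foldl_cons, this, ih]
      cases hp : partChars '@' tl with
      | none => simp [hc]
      | some p => cases p with | mk u v => simp [hc]

-- B's fold in state 0: split at the first '!'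
theorem hmFold0 : ∀ (l nm : List Char),
    List.foldl hmStep (0, nm, [], []) l =
      (match partChars '!' l with
        | none => (0, nm ++ l, [], [])
        | some (a, b) =>
          (match partChars '@' b with
            | none => (1, nm ++ a, b, [])
            | some (u, v) => (2, nm ++ a, u, v))) := by
  intro l
  induction l with
  | nil => simp [partChars]
  | cons c tl ih =>
    intro nm
    simp only [partChars]
    by_cases hc : c = '!'
    · subst hc
      rw [List.foldl_cons]
      have hstep : hmStep (0, nm, [], []) '!' = (1, nm, [], []) := by simp [hmStep]
      rw [hstep, hmFold1]
      cases hp : partChars '@' tl with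
      | none => simp [hp]
      | some p => cases p with | mk u v => simp [hp]
    · have : hmStep (0, nm, [], []) c = (0, nm ++ [c], [], []) := by
        simp [hmStep, hc]
      rw [List.foldl_cons, this, ih]
      cases hp : partChars '!' tl with
      | none => simp [hc]
      | some p =>
        cases p with
        | mk a b =>
          simp only [Option.map_some, if_neg hc]
          cases hq : partChars '@' b with
          | none => simp
          | some q => cases q with | mk u v => simp

-- A's split/pad/index hostmask pipeline equals B's character machine
theorem hostmask_eq (pre : List Char) :
    (let hostmask := (PySem.Str.splitMax? (String.ofList pre) "!" 1).getD []
     let hostmask := if hostmask.length < 2 then hostmask ++ [""] else hostmask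
     let i := (PySem.Str.splitMax? ((PySem.List.pyGet? hostmask 1).getD "") "@" 1).getD []
     let i := if i.length < 2 then i ++ [""] else i
     (((PySem.List.pyGet? hostmask 0).getD ""), ((PySem.List.pyGet? i 0).getD ""), ((PySem.List.pyGet? i 1).getD "")))
    = (let hm := pre.foldl hmStep (0, [], [], [])
       (String.ofList hm.2.1, String.ofList hm.2.2.1, String.ofList hm.2.2.2)) := by
  simp only [PySem.Str.splitMax?, PySem.Chars.splitMax?, String.toList_ofList]
  have h1 : ("!".toList) = ['!'] := by decide
  have h2 : ("@".toList) = ['@'] := by decide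
  rw [h1, h2]
  simp only [List.isEmpty_cons, splitOnMax_one, hmFold0]
  cases hp : partChars '!' pre with
  | none =>
    simp [PySem.List.pyGet?, PySem.List.pyIdx?, partChars]
  | some p =>
    cases p with
    | mk a b =>
      simp only []
      simp [PySem.List.pyGet?, PySem.List.pyIdx?]
      cases hq : partChars '@' b with
      | none => simp [PySem.List.pyGet?, PySem.List.pyIdx?]
      | some q => cases q with | mk u v => simp [PySem.List.pyGet?, PySem.List.pyIdx?]

-- ---- args: A's indexed accumulate/break loop vs B's character scanner ----

-- A's loop as a plain fold over the remaining token list (proof-side description)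
def argsA : List String → List String
  | [] => []
  | i :: tl =>
    if PySem.Str.startswith i ":" then
      [PySem.Str.slice (PySem.Str.join " " (i :: tl)) (some 1) none]
    else
      i :: argsA tl

theorem argsA_pos (i : String) (tl : List String) (hs : PySem.Str.startswith i ":" = true) :
    argsA (i :: tl) = [PySem.Str.slice (PySem.Str.join " " (i :: tl)) (some 1) none] := by
  rw [argsA, if_pos hs]

theorem argsA_neg (i : String) (tl : List String) (hs : ¬ PySem.Str.startswith i ":" = true) :
    argsA (i :: tl) = i :: argsA tl := by
  rw [argsA, if_neg hs]

theorem parseLoopA_eq : ∀ (rest : List String) (n : List String) (c : Int) (args : List String),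
    0 ≤ c → n.drop (c + 1).toNat = rest →
    parseLoopA n rest c args = args ++ argsA rest := by
  intro rest
  induction rest with
  | nil => intro n c args _ _; simp [parseLoopA, argsA]
  | cons i tl ih =>
    intro n c args hc hdrop
    rw [parseLoopA]
    by_cases hs : PySem.Str.startswith i ":" = true
    · rw [if_pos hs]
      rw [PySem.List.slice_from n (by omega : (0:Int) ≤ c + 1), hdrop, argsA_pos i tl hs]
    · rw [if_neg hs]
      have hdrop' : n.drop (c + 1 + 1).toNat = tl := by
        have h2 := congrArg (List.drop 1) hdrop
        rw [List.drop_drop] at h2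
        rw [show (c + 1 + 1).toNat = (c + 1).toNat + 1 from by omega]
        simpa using h2
      rw [ih n (c + 1) (args ++ [i]) (by omega) hdrop', argsA_neg i tl hs]
      simp

-- A's loop over the remaining tokens equals B's scan of the remaining characters
theorem argsA_argsB : ∀ (u : List Char), u = [] ∨ u.head? = some ' ' →
    argsA ((tokensAfter u).map String.ofList) = (argsB u).map String.ofList := by
  intro u
  induction hn : u.length using Nat.strong_induction_on generalizing u with
  | _ n ih =>
    subst hn
    intro hu
    rcases hu with h | h
    · subst h; simp [tokensAfter, argsB, argsA]
    · cases u with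
      | nil => simp at h
      | cons sp rt =>
        simp at h; subst h
        rw [argsB]
        simp only [tokensAfter]
        rw [tokens_eq rt]
        simp only [List.map_cons]
        have hsw : PySem.Str.startswith (String.ofList (tokenB rt).1) ":"
            = (rt.head? == some ':') := by
          simp only [PySem.Str.startswith, String.toList_ofList]
          have h9 : (":" : String).toList = [':'] := by decide
          rw [h9, startswith_token, Bool.eq_iff_iff]
          simp
        by_cases hcolon : rt.head? = some ':'
        · have hswt : PySem.Str.startswith (String.ofList (tokenB rt).1) ":" = true := by
            rw [hsw]; simp [hcolon]
          have hcolb : (rt.head? == some ':') = true := by simp [hcolon]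
          rw [argsA_pos _ _ hswt, hcolb, if_pos rfl]
          simp only [List.map_cons, List.map_nil, List.cons.injEq, and_true]
          apply String.toList_inj.mp
          simp only [PySem.Str.slice, PySem.Str.join, String.toList_ofList]
          have hmap : List.map String.toList
              (String.ofList (tokenB rt).1 :: (tokensAfter (tokenB rt).2).map String.ofList)
              = tokens rt := by
            rw [tokens_eq rt]
            simp [List.map_map, Function.comp_def]
          have hsp : (" " : String).toList = [' '] := by decide
          rw [hmap, hsp, join_tokens, PySem.Chars.slice,
            PySem.List.slice_from rt (by omega : (0:Int) ≤ 1)]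
          cases rt with
          | nil => simp at hcolon
          | cons c r => simp
        · have hswf : ¬ PySem.Str.startswith (String.ofList (tokenB rt).1) ":" = true := by
            rw [hsw]; simpa using hcolon
          have hcolb : (rt.head? == some ':') = false := by simpa using hcolon
          rw [argsA_neg _ _ hswf, hcolb, if_neg (by simp)]
          have hlen : (tokenB rt).2.length < (' ' :: rt).length := by
            have := tokenB_snd_length rt
            simp only [List.length_cons]
            omega
          rw [ih (tokenB rt).2.length hlen (tokenB rt).2 rfl (tokenB_snd_shape rt)]
          simp

theorem pad_case_short (t : String) : parsePad2 [t] = [t, ""] := by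
  rw [parsePad2]; simp; rw [parsePad2]; simp

theorem pad_case_long (t u : String) (r : List String) : parsePad2 (t :: u :: r) = t :: u :: r := by
  rw [parsePad2]; simp

-- ===== VERDICT (by name: the statement is the Claim_ definition above) =====
theorem parse_spec : Claim_equal_parse := by
  intro msg _
  unfold Spec_parse parse parse_alt
  simp only [split_eq_tokens msg, tokens_eq, List.map_cons]
  generalize msg.toList = s
  have hcond : PySem.Str.startswith
      ((PySem.List.pyGet? ((String.ofList (tokenB s).1 :: (tokensAfter (tokenB s).2).map String.ofList)) 0).getD "") ":"
      = (s.head? == some ':') := by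
    rw [PySem.List.pyGet?_zero_cons]
    simp only [Option.getD_some, PySem.Str.startswith, String.toList_ofList]
    have h9 : (":" : String).toList = [':'] := by decide
    rw [h9, startswith_token, Bool.eq_iff_iff]
    simp
  by_cases hc : s.head? = some ':'
  · have hcb : (s.head? == some ':') = true := by simp [hc]
    rw [hcond, hcb]
    simp only [if_pos rfl, if_true]
    cases s with
    | nil => simp at hc
    | cons c s0 =>
      simp only [List.head?_cons, Option.some.injEq] at hc
      subst hc
      simp only [List.tail_cons]
      rw [tokenB_char ':' s0 (by decide)]
      simp only []
      rcases tokenB_snd_shape s0 with h2 | h2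
      · -- no space after the prefix token
        rw [h2]
        simp only [tokensAfter, List.map_nil]
        rw [pad_case_short]
        have hget0 : (PySem.List.pyGet? [String.ofList (':' :: (tokenB s0).1), ""] 0).getD ""
            = String.ofList (':' :: (tokenB s0).1) := by
          rw [PySem.List.pyGet?_zero_cons]; simp
        rw [hget0]
        have hslice : PySem.Str.slice (String.ofList (':' :: (tokenB s0).1)) (some 1) none
            = String.ofList (tokenB s0).1 := by
          simp only [PySem.Str.slice, String.toList_ofList, PySem.Chars.slice]
          rw [PySem.List.slice_from _ (by omega : (0:Int) ≤ 1)]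
          simp
        rw [hslice, hostmask_eq]
        have hslice2 : PySem.List.slice [String.ofList (':' :: (tokenB s0).1), ""] (some 2) none
            = ([] : List String) := by
          rw [PySem.List.slice_from _ (by omega : (0:Int) ≤ 2)]
          simp
        rw [hslice2]
        have hget1 : (PySem.List.pyGet? [String.ofList (':' :: (tokenB s0).1), ""] 1).getD "" = "" := by
          have : ((1:Int)) = ((1:Nat) : Int) := by norm_num
          rw [this, PySem.List.pyGet?_natCast]
          simp
        rw [hget1]
        simp [parseLoopA]
      · -- a space follows the prefix token
        cases hr : (tokenB s0).2 with
        | nil => rw [hr] at h2; simp at h2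
        | cons sp tl2 =>
          rw [hr] at h2; simp at h2; subst h2
          simp only [tokensAfter]
          rw [tokens_eq tl2]
          simp only [List.map_cons]
          rw [pad_case_long]
          have hget0 : (PySem.List.pyGet? (String.ofList (':' :: (tokenB s0).1) ::
              String.ofList (tokenB tl2).1 :: (tokensAfter (tokenB tl2).2).map String.ofList) 0).getD ""
              = String.ofList (':' :: (tokenB s0).1) := by
            rw [PySem.List.pyGet?_zero_cons]; simp
          rw [hget0]
          have hslice : PySem.Str.slice (String.ofList (':' :: (tokenB s0).1)) (some 1) none
              = String.ofList (tokenB s0).1 := by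
            simp only [PySem.Str.slice, String.toList_ofList, PySem.Chars.slice]
            rw [PySem.List.slice_from _ (by omega : (0:Int) ≤ 1)]
            simp
          rw [hslice, hostmask_eq]
          have hget1 : (PySem.List.pyGet? (String.ofList (':' :: (tokenB s0).1) ::
              String.ofList (tokenB tl2).1 :: (tokensAfter (tokenB tl2).2).map String.ofList) 1).getD ""
              = String.ofList (tokenB tl2).1 := by
            have : ((1:Int)) = ((1:Nat) : Int) := by norm_num
            rw [this, PySem.List.pyGet?_natCast]
            simp
          rw [hget1]
          have hslice2 : PySem.List.slice (String.ofList (':' :: (tokenB s0).1) ::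
              String.ofList (tokenB tl2).1 :: (tokensAfter (tokenB tl2).2).map String.ofList) (some 2) none
              = (tokensAfter (tokenB tl2).2).map String.ofList := by
            rw [PySem.List.slice_from _ (by omega : (0:Int) ≤ 2)]
            simp
          rw [hslice2]
          rw [parseLoopA_eq ((tokensAfter (tokenB tl2).2).map String.ofList) _ 1 []
            (by omega) (by rw [hslice2] at *; simp [← hslice2, PySem.List.slice_from _ (by omega : (0:Int) ≤ 2)])]
          rw [argsA_argsB (tokenB tl2).2 (tokenB_snd_shape tl2)]
          simp
  · have hcb : (s.head? == some ':') = false := by simpa using hc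
    rw [hcond, hcb]
    simp only [Bool.false_eq_true, if_neg (by simp : ¬(false = true)), if_false]
    have hget0 : (PySem.List.pyGet? (String.ofList (tokenB s).1 ::
        (tokensAfter (tokenB s).2).map String.ofList) 0).getD "" = String.ofList (tokenB s).1 := by
      rw [PySem.List.pyGet?_zero_cons]; simp
    rw [hget0]
    have hins : PySem.List.insert (String.ofList (tokenB s).1 ::
        (tokensAfter (tokenB s).2).map String.ofList) 0 ""
        = "" :: String.ofList (tokenB s).1 :: (tokensAfter (tokenB s).2).map String.ofList := by
      have hmin : ∀ m : Nat, (min 0 ((m : Int) + 1)).toNat = 0 := by intro m; omega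
      simp [PySem.List.insert, PySem.List.sliceIndices, hmin]
    rw [hins]
    have hslice2 : PySem.List.slice ("" :: String.ofList (tokenB s).1 ::
        (tokensAfter (tokenB s).2).map String.ofList) (some 2) none
        = (tokensAfter (tokenB s).2).map String.ofList := by
      rw [PySem.List.slice_from _ (by omega : (0:Int) ≤ 2)]
      simp
    rw [hslice2]
    rw [parseLoopA_eq _ _ 1 [] (by omega) (by simp)]
    rw [argsA_argsB (tokenB s).2 (tokenB_snd_shape s)]
    simp
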